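-- pv_equiv track=rewrite | github.com/maph420/tpfinal-ProgII | main.py | armar_dict_frecuencias
-- ===== SOURCE A (Python) =====
-- def armar_dict_frecuencias(listaPals, ocurrencias):
--     for i, pal in enumerate(listaPals):
--         palIzq = listaPals[i-1] if i > 0 else ""
--         palDer = listaPals[i+1] if i < len(listaPals)-1 else ""
--
--         if pal not in ocurrencias:
--             ocurrencias[pal] = ({}, {})
--
--         if palIzq != "":
--             # se agrega la palabra al diccionario de las palabras a la izquierda
--             if palIzq not in ocurrencias[pal][0]:
--                 ocurrencias[pal][0][palIzq] = 1
--             else: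
--                 ocurrencias[pal][0][palIzq] += 1
--         if palDer != "":
--             # se agrega la palabra al diccionario de las palabras a la derecha
--             if palDer not in ocurrencias[pal][1]:
--                 ocurrencias[pal][1][palDer] = 1
--             else:
--                 ocurrencias[pal][1][palDer] += 1
--     return ocurrencias
-- ===== SOURCE B (Python) =====
-- # B: aggregate adjacent pairs into a pair-frequency table first, then apply each
-- # pair's total count as one batched update per neighbor dict (A increments per
-- # occurrence during a single indexed scan). Mutates `ocurrencias` in place like A.
-- def armar_dict_frecuencias(listaPals, ocurrencias):
--     for pal in listaPals:
--         if pal not in ocurrencias: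
--             ocurrencias[pal] = ({}, {})
--     pares = {}
--     for i in range(len(listaPals) - 1):
--         par = (listaPals[i], listaPals[i + 1])
--         pares[par] = pares.get(par, 0) + 1
--     for (izq, der), c in pares.items():
--         if izq != "":
--             dIzq = ocurrencias[der][0]
--             dIzq[izq] = dIzq.get(izq, 0) + c
--         if der != "":
--             dDer = ocurrencias[izq][1]
--             dDer[der] = dDer.get(der, 0) + c
--     return ocurrencias
-- ===== Notes on version B (the rewrite author's own statement) =====
-- stated objective: alternative
-- what changed: Instead of A's single indexed scan that re-reads listaPals[i-1]/listaPals[i+1] and bumps each neighbor counter once per occurrence, B first registers every word, then aggregates the adjacent pairs into a pair-frequency table and finally applies each distinct pair's total count as one batched get-or-default update per neighbor dict (first-occurrence order of the table preserves A's key order).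
import Mathlib
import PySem

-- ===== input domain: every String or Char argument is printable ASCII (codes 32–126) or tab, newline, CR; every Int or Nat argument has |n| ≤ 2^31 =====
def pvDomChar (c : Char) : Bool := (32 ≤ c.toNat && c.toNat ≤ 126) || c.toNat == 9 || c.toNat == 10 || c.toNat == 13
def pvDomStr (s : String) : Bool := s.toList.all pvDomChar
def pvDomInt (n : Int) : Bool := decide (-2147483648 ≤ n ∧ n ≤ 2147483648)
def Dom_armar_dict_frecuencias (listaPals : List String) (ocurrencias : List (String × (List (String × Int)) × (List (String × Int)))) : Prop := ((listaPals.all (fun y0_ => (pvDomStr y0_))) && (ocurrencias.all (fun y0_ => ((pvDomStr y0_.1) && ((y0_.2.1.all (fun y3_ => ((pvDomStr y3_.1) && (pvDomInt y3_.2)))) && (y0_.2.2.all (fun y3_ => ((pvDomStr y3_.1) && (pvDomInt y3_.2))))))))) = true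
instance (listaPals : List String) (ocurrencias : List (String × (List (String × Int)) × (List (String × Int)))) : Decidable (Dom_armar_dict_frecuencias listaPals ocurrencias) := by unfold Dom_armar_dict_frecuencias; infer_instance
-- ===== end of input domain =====

-- B aggregates the adjacent pairs into a pair-frequency table first and applies each pair's
-- total count as one batched update, instead of A's per-occurrence increments in one indexed
-- scan; both Pythons mutate `ocurrencias` in place and return it — the equivalence proved
-- here is about the returned value.


-- the dict-of-pairs-of-dicts state both Pythons mutate
abbrev pvDD := PySem.Dict String (PySem.Dict String Int × PySem.Dict String Int)

-- Python's ({}, {})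
def pvDfl : PySem.Dict String Int × PySem.Dict String Int := (PySem.Dict.empty, PySem.Dict.empty)

-- shared marshalling between the required assoc-list type and the dict state
def pvToDD (oc : List (String × (List (String × Int)) × (List (String × Int)))) : pvDD :=
  ⟨oc.map (fun p => (p.1, (⟨p.2.1⟩, ⟨p.2.2⟩)))⟩

def pvOfDD (d : pvDD) : List (String × (List (String × Int)) × (List (String × Int))) :=
  d.items.map (fun p => (p.1, p.2.1.items, p.2.2.items))

-- ===== PORT A =====
-- A's loop body; `pal`'s entry is created just above the two increments, so the defaults
-- handed to `modify` for the outer key are never used (Python's KeyError is unreachable).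
def pvStepA (listaPals : List String) (d : pvDD) (ip : Int × String) : pvDD :=
  let i := ip.1
  let pal := ip.2
  let palIzq := if 0 < i then PySem.List.pyGetD listaPals (i - 1) "" else ""
  let palDer := if i < (listaPals.length : Int) - 1 then PySem.List.pyGetD listaPals (i + 1) "" else ""
  let d := if d.contains pal then d else d.insert pal pvDfl
  let d := if palIzq ≠ "" then
      d.modify pal pvDfl (fun p => (p.1.modify palIzq 0 (· + 1), p.2))
    else d
  if palDer ≠ "" then
      d.modify pal pvDfl (fun p => (p.1, p.2.modify palDer 0 (· + 1)))
  else d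

def armar_dict_frecuencias (listaPals : List String) (ocurrencias : List (String × (List (String × Int)) × (List (String × Int)))) : List (String × (List (String × Int)) × (List (String × Int))) :=
  pvOfDD ((PySem.List.enumerate listaPals).foldl (pvStepA listaPals) (pvToDD ocurrencias))

-- ===== PORT B =====
-- B's third loop: one batched update per distinct pair (izq, der) with its total count c
def pvStepB (d : pvDD) (pc : (String × String) × Int) : pvDD :=
  let izq := pc.1.1
  let der := pc.1.2
  let c := pc.2
  let d := if izq ≠ "" then d.modify der pvDfl (fun q => (q.1.modify izq 0 (· + c), q.2)) else d
  if der ≠ "" then d.modify izq pvDfl (fun q => (q.1, q.2.modify der 0 (· + c))) else d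

def armar_dict_frecuencias_alt (listaPals : List String) (ocurrencias : List (String × (List (String × Int)) × (List (String × Int)))) : List (String × (List (String × Int)) × (List (String × Int))) :=
  -- pass 1: register every word
  let d0 := listaPals.foldl (fun d pal => if d.contains pal then d else d.insert pal pvDfl) (pvToDD ocurrencias)
  -- pass 2: pair-frequency table of adjacent pairs
  let pares := (listaPals.zip (PySem.List.slice listaPals (some 1) none)).foldl
      (fun c par => c.modify par 0 (· + 1)) PySem.Dict.empty
  -- pass 3: batched neighbor updates, one per distinct pair
  pvOfDD (pares.items.foldl pvStepB d0)

-- ===== PRECONDITION & SPEC =====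
def Spec_armar_dict_frecuencias (listaPals : List String) (ocurrencias : List (String × (List (String × Int)) × (List (String × Int)))) (out : List (String × (List (String × Int)) × (List (String × Int)))) : Prop := out = armar_dict_frecuencias_alt listaPals ocurrencias
instance (listaPals : List String) (ocurrencias : List (String × (List (String × Int)) × (List (String × Int)))) (out : List (String × (List (String × Int)) × (List (String × Int)))) : Decidable (Spec_armar_dict_frecuencias listaPals ocurrencias out) := by unfold Spec_armar_dict_frecuencias; infer_instance

-- ===== CLAIM (what is proved, stated in full; the proofs are below) =====
def Claim_equal_armar_dict_frecuencias : Prop := ∀ (listaPals : List String) (ocurrencias : List (String × (List (String × Int)) × (List (String × Int)))), Dom_armar_dict_frecuencias listaPals ocurrencias → Spec_armar_dict_frecuencias listaPals ocurrencias (armar_dict_frecuencias listaPals ocurrencias)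

-- ===== LEMMAS AND PROOFS =====

theorem pv_modify_congr_base {ν : Type} (d : PySem.Dict String ν) (k : String) (v0 : ν)
    (f g : ν → ν) (h : f (d.getD k v0) = g (d.getD k v0)) :
    d.modify k v0 f = d.modify k v0 g := by
  unfold PySem.Dict.modify
  rw [h]

theorem pv_modify_modify_self {ν : Type} (d : PySem.Dict String ν) (k : String) (v0 v0' : ν)
    (f g : ν → ν) :
    (d.modify k v0 f).modify k v0' g = d.modify k v0 (fun v => g (f v)) := by
  unfold PySem.Dict.modify
  rw [PySem.Dict.getD_insert_self, PySem.Dict.insert_insert_self]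

-- one-sided commutation: a modify at a PRESENT key commutes with a modify at any other key
theorem pv_modify_comm {ν : Type} (d : PySem.Dict String ν) (k k' : String) (v0 v0' : ν)
    (f g : ν → ν) (hk : d.contains k = true) (hne : k' ≠ k) :
    (d.modify k v0 f).modify k' v0' g = (d.modify k' v0' g).modify k v0 f := by
  unfold PySem.Dict.modify
  rw [PySem.Dict.getD_insert_of_ne d _ _ hne, PySem.Dict.getD_insert_of_ne d _ _ (Ne.symm hne)]
  set A := f (d.getD k v0) with hA
  set B := g (d.getD k' v0')
  by_cases hk' : d.contains k' = true
  · -- both keys present: both inserts are in-place maps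
    have c1 : (d.insert k A).contains k' = true := by
      rw [PySem.Dict.contains_insert, hk', Bool.or_true]
    have c2 : (d.insert k' B).contains k = true := by
      rw [PySem.Dict.contains_insert, hk, Bool.or_true]
    unfold PySem.Dict.insert at c1 c2 ⊢
    rw [if_pos hk, if_pos hk'] at *
    rw [if_pos c1, if_pos c2]
    congr 1
    simp only [List.map_map]
    apply List.map_congr_left
    intro p _
    by_cases h1 : (p.1 == k) = true
    · have e1 : p.1 = k := by simpa using h1
      simp [Function.comp, e1, Ne.symm hne]
    · by_cases h2 : (p.1 == k') = true
      · have e2 : p.1 = k' := by simpa using h2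
        have e1 : p.1 ≠ k := by simpa using h1
        simp [Function.comp, e2, hne]
      · have e1 : p.1 ≠ k := by simpa using h1
        have e2 : p.1 ≠ k' := by simpa using h2
        simp [Function.comp, e1, e2]
  · -- k' absent: its insert appends, the in-place map at k commutes past it
    have hkf' : d.contains k' = false := by simpa using hk'
    have e1 : d.insert k A = ⟨d.items.map (fun p => if (p.1 == k) = true then (k, A) else p)⟩ := by
      unfold PySem.Dict.insert; rw [if_pos hk]
    have e2 : d.insert k' B = ⟨d.items ++ [(k', B)]⟩ := by
      unfold PySem.Dict.insert; rw [if_neg (by simp [hkf'])]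
    have c1 : (d.insert k A).contains k' = false := by
      rw [PySem.Dict.contains_insert, beq_eq_false_iff_ne.mpr hne, hkf']; rfl
    have c2 : (d.insert k' B).contains k = true := by
      rw [PySem.Dict.contains_insert, hk, Bool.or_true]
    rw [e1] at c1
    rw [e2] at c2
    rw [e1, e2]
    unfold PySem.Dict.insert
    rw [if_neg (by rw [c1]; exact Bool.false_ne_true), if_pos c2]
    congr 1
    rw [List.map_append]
    congr 1
    simp only [List.map_cons, List.map_nil, List.cons.injEq, and_true]
    rw [if_neg (by simp [hne])]

theorem pv_sd_modify_comm {ν : Type} (d : PySem.Dict String ν) (k w : String) (v0 sv : ν)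
    (f : ν → ν) (h : d.contains k = true) :
    (d.modify k v0 f).setdefault w sv = (d.setdefault w sv).modify k v0 f := by
  unfold PySem.Dict.modify
  by_cases hw : d.contains w = true
  · have h1 : (d.insert k (f (d.getD k v0))).contains w = true := by
      rw [PySem.Dict.contains_insert, hw, Bool.or_true]
    unfold PySem.Dict.setdefault
    rw [if_pos h1, if_pos hw]
  · have hwk : w ≠ k := by
      intro e; rw [e, h] at hw; exact hw rfl
    have hwf : d.contains w = false := by
      simpa using hw
    have h1 : (d.insert k (f (d.getD k v0))).contains w = false := by
      rw [PySem.Dict.contains_insert, beq_eq_false_iff_ne.mpr hwk, hwf]; rfl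
    unfold PySem.Dict.setdefault
    rw [if_neg (by simp [h1]), if_neg hw]
    have hsome : (List.find? (fun p => p.1 == k) d.items).isSome := by
      unfold PySem.Dict.contains at h
      rcases List.any_eq_true.mp h with ⟨p, hp, hpk⟩
      exact List.find?_isSome.mpr ⟨p, hp, hpk⟩
    have hgetD : (⟨d.items ++ [(w, sv)]⟩ : PySem.Dict String ν).getD k v0 = d.getD k v0 := by
      rw [PySem.Dict.getD_eq_get?_getD, PySem.Dict.getD_eq_get?_getD]
      unfold PySem.Dict.get?
      rw [List.find?_append]
      rcases Option.isSome_iff_exists.mp hsome with ⟨q, hq⟩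
      rw [hq]
      rfl
    have hck : (⟨d.items ++ [(w, sv)]⟩ : PySem.Dict String ν).contains k = true := by
      unfold PySem.Dict.contains at h ⊢
      rw [List.any_append, h]; rfl
    rw [hgetD]
    unfold PySem.Dict.insert
    rw [if_pos h, if_pos hck]
    congr 1
    rw [List.map_append]
    congr 1
    simp only [List.map_cons, List.map_nil, List.cons.injEq, and_true]
    rw [if_neg (by simp [hwk])]

def pvSd {ν : Type} (v : ν) (d : PySem.Dict String ν) (w : String) : PySem.Dict String ν :=
  d.setdefault w v

def pvSdAll {ν : Type} (v : ν) (ws : List String) (d : PySem.Dict String ν) : PySem.Dict String ν :=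
  ws.foldl (pvSd v) d

theorem pv_contains_sdAll_mono {ν : Type} (v : ν) (ws : List String) : ∀ (d : PySem.Dict String ν)
    (k : String), d.contains k = true → (pvSdAll v ws d).contains k = true := by
  induction ws with
  | nil => intro d k h; exact h
  | cons w rest ih =>
      intro d k h
      exact ih _ k (by rw [pvSd, PySem.Dict.contains_setdefault, h, Bool.or_true])

theorem pv_contains_sdAll_of_mem {ν : Type} (v : ν) (ws : List String) : ∀ (d : PySem.Dict String ν)
    (k : String), k ∈ ws → (pvSdAll v ws d).contains k = true := by
  induction ws with
  | nil => intro d k h; cases h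
  | cons w rest ih =>
      intro d k h
      rcases List.mem_cons.mp h with h | h
      · exact pv_contains_sdAll_mono v rest _ k
          (by rw [pvSd, PySem.Dict.contains_setdefault, h]; simp)
      · exact ih _ k h

theorem pv_sdAll_modify_comm {ν : Type} (v : ν) (ws : List String) : ∀ (d : PySem.Dict String ν)
    (k : String) (v0 : ν) (f : ν → ν), d.contains k = true →
    pvSdAll v ws (d.modify k v0 f) = (pvSdAll v ws d).modify k v0 f := by
  induction ws with
  | nil => intro d k v0 f _; rfl
  | cons w rest ih =>
      intro d k v0 f h
      show pvSdAll v rest (pvSd v (d.modify k v0 f) w) = _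
      rw [pvSd, pv_sd_modify_comm d k w v0 v f h]
      exact ih _ k v0 f (by rw [PySem.Dict.contains_setdefault, h, Bool.or_true])

def pvIncL (d : pvDD) (w a : String) : pvDD :=
  d.modify w pvDfl (fun p => (p.1.modify a 0 (· + 1), p.2))

def pvIncR (d : pvDD) (w b : String) : pvDD :=
  d.modify w pvDfl (fun p => (p.1, p.2.modify b 0 (· + 1)))

-- one occurrence of the pair p = (izq, der): the two guarded increments
def pvIncPair (d : pvDD) (p : String × String) : pvDD :=
  let d := if p.1 ≠ "" then pvIncL d p.2 p.1 else d
  if p.2 ≠ "" then pvIncR d p.1 p.2 else d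

def pvALoop (prev : String) : List String → pvDD → pvDD
  | [], d => d
  | w :: rest, d =>
      let der := rest.headD ""
      let d1 := d.setdefault w pvDfl
      let d2 := if prev ≠ "" then pvIncL d1 w prev else d1
      let d3 := if der ≠ "" then pvIncR d2 w der else d2
      pvALoop w rest d3

-- the `if contains` guard in both ports IS setdefault
theorem pv_guard_sd (d : pvDD) (pal : String) :
    (if d.contains pal then d else d.insert pal pvDfl) = d.setdefault pal pvDfl := by
  unfold PySem.Dict.setdefault PySem.Dict.insert
  by_cases h : d.contains pal = true
  · simp [h]
  · simp only [Bool.not_eq_true] at h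
    simp [h]

theorem pv_bridge (L : List String) : ∀ (suf : List String) (k : Nat), L.drop k = suf → ∀ d,
    (PySem.List.enumerate suf (k : Int)).foldl (pvStepA L) d
      = pvALoop (if k = 0 then "" else L.getD (k - 1) "") suf d := by
  intro suf
  induction suf with
  | nil => intro k _ d; simp [PySem.List.enumerate, pvALoop]
  | cons w rest ih =>
      intro k h d
      have hk : L[k]? = some w := by
        rw [← List.head?_drop, h]; rfl
      have hrest : L.drop (k + 1) = rest := by
        rw [← List.tail_drop, h]; rfl
      rw [PySem.List.enumerate_cons, List.foldl_cons]
      have hcast : (k : Int) + 1 = ((k + 1 : Nat) : Int) := by push_cast; ring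
      rw [hcast, ih (k + 1) hrest]
      have hprev : (if k + 1 = 0 then "" else L.getD (k + 1 - 1) "") = w := by
        simp [List.getD, hk]
      rw [hprev]
      show pvALoop w rest (pvStepA L d ((k : Int), w)) = pvALoop _ (w :: rest) d
      simp only [pvStepA]
      have hIzq : (if 0 < (k : Int) then PySem.List.pyGetD L ((k : Int) - 1) "" else "")
          = (if k = 0 then "" else L.getD (k - 1) "") := by
        rcases Nat.eq_zero_or_pos k with h0 | h0
        · subst h0; simp
        · rw [if_pos (by exact_mod_cast h0), if_neg (by omega)]
          have : (k : Int) - 1 = ((k - 1 : Nat) : Int) := by omega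
          rw [this, PySem.List.pyGetD_natCast]
      have hDer : (if (k : Int) < (L.length : Int) - 1 then PySem.List.pyGetD L ((k : Int) + 1) "" else "")
          = rest.headD "" := by
        cases rest with
        | nil =>
            have hlen : L.length ≤ k + 1 := by
              have := congrArg List.length hrest
              simp [List.length_drop] at this
              omega
            rw [if_neg (by omega)]
            rfl
        | cons r rest' =>
            have hkr : L[k+1]? = some r := by
              rw [← List.head?_drop, hrest]; rfl
            have hlen : k + 1 < L.length := List.getElem?_eq_some_iff.mp hkr |>.1
            rw [if_pos (by omega), hcast, PySem.List.pyGetD_natCast]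
            simp [List.getD, hkr]
      rw [hIzq, hDer, pv_guard_sd]
      rfl

def pvBPairs (ws : List String) (d : pvDD) : pvDD :=
  (ws.zip ws.tail).foldl pvIncPair d

def pvBFrom (prev : String) (ws : List String) (d : pvDD) : pvDD :=
  match ws with
  | [] => d
  | w :: rest => pvBPairs (w :: rest) (if prev ≠ "" then pvIncL d w prev else d)

theorem pv_bpairs_cons (w r : String) (rest : List String) (d : pvDD) :
    pvBPairs (w :: r :: rest) d = pvBPairs (r :: rest) (pvIncPair d (w, r)) := rfl

theorem pv_swap_lr (Z : pvDD) (w r : String) (hZw : Z.contains w = true) :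
    pvIncL (pvIncR Z w r) r w = pvIncR (pvIncL Z r w) w r := by
  unfold pvIncL pvIncR
  by_cases hrw : r = w
  · subst hrw
    rw [pv_modify_modify_self, pv_modify_modify_self]
  · exact pv_modify_comm Z w r _ _ _ _ hZw hrw

theorem pv_main : ∀ (ws : List String) (prev : String) (d : pvDD),
    pvALoop prev ws d
      = pvBFrom prev ws (pvSdAll pvDfl ws d) := by
  intro ws
  induction ws with
  | nil => intro prev d; rfl
  | cons w rest ih =>
      intro prev d
      have cw1 : (d.setdefault w pvDfl).contains w = true := by
        rw [PySem.Dict.contains_setdefault]; simp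
      simp only [pvALoop]
      cases rest with
      | nil =>
          simp only [List.headD_nil, ne_eq, not_true_eq_false, if_false, ite_not]
          rw [ih]
          by_cases hp : prev = "" <;>
            simp [hp, pvBFrom, pvBPairs, pvSdAll, pvSd, pvIncL]
      | cons r rest' =>
          simp only [List.headD_cons]
          rw [ih]
          set d1 := d.setdefault w pvDfl with hd1
          set Y := pvSdAll pvDfl (r :: rest') d1 with hY
          have commL : ∀ (dd : pvDD) (a : String), dd.contains w = true →
              pvSdAll pvDfl (r :: rest') (pvIncL dd w a)
                = pvIncL (pvSdAll pvDfl (r :: rest') dd) w a := by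
            intro dd a h
            unfold pvIncL
            exact pv_sdAll_modify_comm _ _ dd w _ _ h
          have commR : ∀ (dd : pvDD) (b : String), dd.contains w = true →
              pvSdAll pvDfl (r :: rest') (pvIncR dd w b)
                = pvIncR (pvSdAll pvDfl (r :: rest') dd) w b := by
            intro dd b h
            unfold pvIncR
            exact pv_sdAll_modify_comm _ _ dd w _ _ h
          have cw2 : (if prev ≠ "" then pvIncL d1 w prev else d1).contains w = true := by
            by_cases hp : prev = "" <;> simp [hp, pvIncL, PySem.Dict.contains_modify, cw1]
          have hinner : pvSdAll pvDfl (r :: rest')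
                (if prev ≠ "" then pvIncL d1 w prev else d1)
              = (if prev ≠ "" then pvIncL Y w prev else Y) := by
            by_cases hp : prev = ""
            · rw [if_neg (by simp [hp]), if_neg (by simp [hp])]
            · rw [if_pos hp, if_pos hp]
              exact commL d1 prev cw1
          have hX : pvSdAll pvDfl (r :: rest')
                (if r ≠ "" then pvIncR (if prev ≠ "" then pvIncL d1 w prev else d1) w r
                 else (if prev ≠ "" then pvIncL d1 w prev else d1))
              = (if r ≠ "" then pvIncR (if prev ≠ "" then pvIncL Y w prev else Y) w r
                 else (if prev ≠ "" then pvIncL Y w prev else Y)) := by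
            by_cases hr : r = ""
            · subst hr
              simp only [ne_eq, not_true_eq_false, if_false]
              exact hinner
            · rw [if_pos hr, if_pos hr]
              rw [commR _ r cw2, hinner]
          set Z := (if prev ≠ "" then pvIncL Y w prev else Y) with hZ
          have hZw : Z.contains w = true := by
            have hYw : Y.contains w = true := pv_contains_sdAll_mono _ _ d1 w cw1
            rw [hZ]
            by_cases hp : prev = "" <;> simp [hp, pvIncL, PySem.Dict.contains_modify, hYw]
          have hSD : pvSdAll pvDfl (w :: r :: rest') d
              = pvSdAll pvDfl (r :: rest') d1 := rfl
          rw [hSD]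
          simp only [pvBFrom]
          rw [pv_bpairs_cons]
          rw [hX]
          congr 1
          have hpair : pvIncPair Z (w, r)
              = if r ≠ "" then pvIncR (if w ≠ "" then pvIncL Z r w else Z) w r
                else (if w ≠ "" then pvIncL Z r w else Z) := rfl
          rw [hpair]
          by_cases hw : w = "" <;> by_cases hr : r = ""
          · simp [hw, hr]
          · simp [hw, hr]
          · simp [hw, hr]
          · simp only [hw, hr, ne_eq, not_false_iff, if_true]
            exact pv_swap_lr Z w r hZw

theorem pv_bfrom_empty (ws : List String) (d : pvDD) : pvBFrom "" ws d = pvBPairs ws d := by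
  cases ws with
  | nil => rfl
  | cons w rest => simp [pvBFrom]

-- ===== the grouping argument: per-occurrence increments = counter-grouped increments =====

-- elementary update: one `+ c` on one inner dict; (side, outer key, inner key)
def pvApp (c : Int) (d : pvDD) (o : Bool × String × String) : pvDD :=
  if o.1 then d.modify o.2.1 pvDfl (fun v => (v.1.modify o.2.2 0 (· + c), v.2))
  else d.modify o.2.1 pvDfl (fun v => (v.1, v.2.modify o.2.2 0 (· + c)))

-- the (at most two) updates one pair performs
def pvOps (p : String × String) : List (Bool × String × String) :=
  (if p.1 ≠ "" then [(true, p.2, p.1)] else []) ++ (if p.2 ≠ "" then [(false, p.1, p.2)] else [])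

def pvIncBy (d : pvDD) (p : String × String) (c : Int) : pvDD := (pvOps p).foldl (pvApp c) d

theorem pv_incPair_eq (d : pvDD) (p : String × String) : pvIncPair d p = pvIncBy d p 1 := by
  obtain ⟨a, b⟩ := p
  by_cases h1 : a = "" <;> by_cases h2 : b = "" <;>
    simp [pvIncPair, pvIncBy, pvOps, pvApp, pvIncL, pvIncR, h1, h2]

theorem pv_stepB_eq (d : pvDD) (pc : (String × String) × Int) : pvStepB d pc = pvIncBy d pc.1 pc.2 := by
  obtain ⟨⟨a, b⟩, c⟩ := pc
  by_cases h1 : a = "" <;> by_cases h2 : b = "" <;>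
    simp [pvStepB, pvIncBy, pvOps, pvApp, h1, h2]

-- the inner dict an op addresses
def pvInner (d : pvDD) (o : Bool × String × String) : PySem.Dict String Int :=
  if o.1 then (d.getD o.2.1 pvDfl).1 else (d.getD o.2.1 pvDfl).2

theorem pv_inner_app (c : Int) (d : pvDD) (o1 o2 : Bool × String × String) :
    pvInner (pvApp c d o2) o1
      = if o1.2.1 = o2.2.1 ∧ o1.1 = o2.1 then (pvInner d o1).modify o2.2.2 0 (· + c)
        else pvInner d o1 := by
  by_cases ho : o1.2.1 = o2.2.1
  · cases hs1 : o1.1 <;> cases hs2 : o2.1 <;>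
      simp [pvInner, pvApp, ho, hs1, hs2, PySem.Dict.getD_modify_self]
  · cases hs1 : o1.1 <;> cases hs2 : o2.1 <;>
      simp [pvInner, pvApp, hs1, hs2, PySem.Dict.getD_modify_of_ne _ _ _ ho, ho]

theorem pv_contains_app (c : Int) (d : pvDD) (o : Bool × String × String) (k : String)
    (h : d.contains k = true) : (pvApp c d o).contains k = true := by
  cases hs : o.1 <;> simp [pvApp, hs, PySem.Dict.contains_modify, h]

theorem pv_contains_foldl_app (c : Int) (os : List (Bool × String × String)) :
    ∀ (d : pvDD) (k : String), d.contains k = true → (os.foldl (pvApp c) d).contains k = true := by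
  induction os with
  | nil => intro d k h; exact h
  | cons o os ih => intro d k h; exact ih _ k (pv_contains_app c d o k h)

theorem pv_contains_incBy (d : pvDD) (p : String × String) (c : Int) (k : String)
    (h : d.contains k = true) : (pvIncBy d p c).contains k = true :=
  pv_contains_foldl_app c (pvOps p) d k h

theorem pv_pres_app (c : Int) (d : pvDD) (o1 o2 : Bool × String × String)
    (h : (pvInner d o1).contains o1.2.2 = true) :
    (pvInner (pvApp c d o2) o1).contains o1.2.2 = true := by
  rw [pv_inner_app]
  split
  · rw [PySem.Dict.contains_modify, h, Bool.or_true]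
  · exact h

theorem pv_pres_foldl_app (c : Int) (os : List (Bool × String × String)) :
    ∀ (d : pvDD) (o1 : Bool × String × String), (pvInner d o1).contains o1.2.2 = true →
    (pvInner (os.foldl (pvApp c) d) o1).contains o1.2.2 = true := by
  induction os with
  | nil => intro d o1 h; exact h
  | cons o os ih => intro d o1 h; exact ih _ o1 (pv_pres_app c d o1 o h)

theorem pv_pres_incBy (d : pvDD) (p : String × String) (c : Int) (o1 : Bool × String × String)
    (h : (pvInner d o1).contains o1.2.2 = true) :
    (pvInner (pvIncBy d p c) o1).contains o1.2.2 = true :=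
  pv_pres_foldl_app c (pvOps p) d o1 h

theorem pv_pres_self_app (c : Int) (d : pvDD) (o : Bool × String × String) :
    (pvInner (pvApp c d o) o).contains o.2.2 = true := by
  rw [pv_inner_app]
  simp [PySem.Dict.contains_modify]

-- after one application of a pair, both its inner keys are present
theorem pv_supp_incBy (d : pvDD) (p : String × String) (c : Int) :
    ∀ o ∈ pvOps p, (pvInner (pvIncBy d p c) o).contains o.2.2 = true := by
  intro o ho
  by_cases g1 : p.1 = "" <;> by_cases g2 : p.2 = ""
  · exact absurd ho (by simp [pvOps, g1, g2])
  · have hop : pvOps p = [(false, p.1, p.2)] := by simp [pvOps, g1, g2]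
    have : o = (false, p.1, p.2) := by
      rw [hop] at ho; simpa using ho
    subst this
    show (pvInner ((pvOps p).foldl (pvApp c) d) _).contains _ = true
    rw [hop]
    exact pv_pres_self_app c d _
  · have hop : pvOps p = [(true, p.2, p.1)] := by simp [pvOps, g1, g2]
    have : o = (true, p.2, p.1) := by
      rw [hop] at ho; simpa using ho
    subst this
    show (pvInner ((pvOps p).foldl (pvApp c) d) _).contains _ = true
    rw [hop]
    exact pv_pres_self_app c d _
  · have hop : pvOps p = [(true, p.2, p.1), (false, p.1, p.2)] := by simp [pvOps, g1, g2]
    have hfold : pvIncBy d p c = pvApp c (pvApp c d (true, p.2, p.1)) (false, p.1, p.2) := by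
      show (pvOps p).foldl (pvApp c) d = _
      rw [hop]; rfl
    rw [hop] at ho
    rcases (by simpa using ho : o = (true, p.2, p.1) ∨ o = (false, p.1, p.2)) with h | h <;> subst h <;> rw [hfold]
    · exact pv_pres_app c _ _ _ (pv_pres_self_app c d _)
    · exact pv_pres_self_app c _ _

-- two elementary updates commute when the first one's key is present (or they are unrelated)
theorem pv_app_comm (c1 c2 : Int) (d : pvDD) (o1 o2 : Bool × String × String)
    (hcont : d.contains o1.2.1 = true)
    (hpres : o1.1 = o2.1 → o1.2.1 = o2.2.1 →
      (o1.2.2 ≠ o2.2.2 ∧ (pvInner d o1).contains o1.2.2 = true)) :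
    pvApp c2 (pvApp c1 d o1) o2 = pvApp c1 (pvApp c2 d o2) o1 := by
  obtain ⟨s1, w1, a1⟩ := o1
  obtain ⟨s2, w2, a2⟩ := o2
  by_cases ho : w1 = w2
  · subst ho
    by_cases hs : s1 = s2
    · subst hs
      obtain ⟨hne, hin⟩ := hpres rfl rfl
      cases s1 <;>
      · simp only [pvApp, if_true, if_false, Bool.false_eq_true]
        rw [pv_modify_modify_self, pv_modify_modify_self]
        apply pv_modify_congr_base
        simp only []
        simp only [pvInner] at hin
        first
        | exact congrArg (fun D => ((d.getD w1 pvDfl).1, D))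
            (pv_modify_comm _ a1 a2 0 0 _ _ (by simpa using hin) (Ne.symm hne))
        | exact congrArg (fun D => (D, (d.getD w1 pvDfl).2))
            (pv_modify_comm _ a1 a2 0 0 _ _ (by simpa using hin) (Ne.symm hne))
    · cases s1 <;> cases s2 <;> try (exact absurd rfl hs)
      · simp only [pvApp, if_true, if_false, Bool.false_eq_true]
        rw [pv_modify_modify_self, pv_modify_modify_self]
      · simp only [pvApp, if_true, if_false, Bool.false_eq_true]
        rw [pv_modify_modify_self, pv_modify_modify_self]
  · cases s1 <;> cases s2 <;>
    · simp only [pvApp, if_true, if_false, Bool.false_eq_true]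
      exact pv_modify_comm d w1 w2 pvDfl pvDfl _ _ (by simpa using hcont) (Ne.symm ho)

theorem pv_swap_one_many (e c : Int) (os : List (Bool × String × String)) :
    ∀ (d : pvDD) (o : Bool × String × String), d.contains o.2.1 = true →
    (pvInner d o).contains o.2.2 = true →
    (∀ o2 ∈ os, o.1 = o2.1 → o.2.1 = o2.2.1 → o.2.2 ≠ o2.2.2) →
    os.foldl (pvApp e) (pvApp c d o) = pvApp c (os.foldl (pvApp e) d) o := by
  induction os with
  | nil => intro d o _ _ _; rfl
  | cons o2 os ih =>
      intro d o hc hi hcomp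
      rw [List.foldl_cons, List.foldl_cons]
      rw [pv_app_comm c e d o o2 hc (fun hs ho => ⟨hcomp o2 (by simp) hs ho, hi⟩)]
      exact ih (pvApp e d o2) o (pv_contains_app e d o2 _ hc) (pv_pres_app e d o o2 hi)
        (fun o3 h3 => hcomp o3 (by simp [h3]))

-- key-disjointness of the op lists of two DIFFERENT pairs
theorem pv_ops_compat (p q : String × String) (hne : p ≠ q) :
    ∀ o1 ∈ pvOps p, ∀ o2 ∈ pvOps q, o1.1 = o2.1 → o1.2.1 = o2.2.1 → o1.2.2 ≠ o2.2.2 := by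
  intro o1 h1 o2 h2 hs ho
  have hm1 : o1 = (true, p.2, p.1) ∨ o1 = (false, p.1, p.2) := by
    by_cases g1 : p.1 = "" <;> by_cases g2 : p.2 = "" <;>
      simp_all [pvOps]
  have hm2 : o2 = (true, q.2, q.1) ∨ o2 = (false, q.1, q.2) := by
    by_cases g1 : q.1 = "" <;> by_cases g2 : q.2 = "" <;>
      simp_all [pvOps]
  rcases hm1 with h1' | h1' <;> rcases hm2 with h2' | h2'
  · subst h1'; subst h2'
    simp only [] at ho ⊢
    intro hx
    exact hne (Prod.ext hx ho)
  · subst h1'; subst h2'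
    simp at hs
  · subst h1'; subst h2'
    simp at hs
  · subst h1'; subst h2'
    simp only [] at ho ⊢
    intro hx
    exact hne (Prod.ext ho hx)

-- applying two DIFFERENT pairs commutes once the first pair has been applied at least once
theorem pv_swap_pairs (d : pvDD) (p q : String × String) (c e : Int) (hne : p ≠ q)
    (hp1 : d.contains p.1 = true) (hp2 : d.contains p.2 = true)
    (_hq1 : d.contains q.1 = true) (_hq2 : d.contains q.2 = true)
    (hsupp : ∀ o ∈ pvOps p, (pvInner d o).contains o.2.2 = true) :
    pvIncBy (pvIncBy d p c) q e = pvIncBy (pvIncBy d q e) p c := by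
  have hcompat := pv_ops_compat p q hne
  by_cases g1 : p.1 = "" <;> by_cases g2 : p.2 = ""
  · simp [pvIncBy, pvOps, g1, g2]
  · -- only the right op (false, p.1, p.2)
    have hop : pvOps p = [(false, p.1, p.2)] := by simp [pvOps, g1, g2]
    show (pvOps q).foldl (pvApp e) (pvIncBy d p c) = pvIncBy ((pvOps q).foldl (pvApp e) d) p c
    rw [pvIncBy, pvIncBy, hop]
    simp only [List.foldl_cons, List.foldl_nil]
    exact pv_swap_one_many e c (pvOps q) d _ hp1
      (hsupp _ (by rw [hop]; simp))
      (fun o2 h2 => hcompat _ (by rw [hop]; simp) o2 h2)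
  · have hop : pvOps p = [(true, p.2, p.1)] := by simp [pvOps, g1, g2]
    show (pvOps q).foldl (pvApp e) (pvIncBy d p c) = pvIncBy ((pvOps q).foldl (pvApp e) d) p c
    rw [pvIncBy, pvIncBy, hop]
    simp only [List.foldl_cons, List.foldl_nil]
    exact pv_swap_one_many e c (pvOps q) d _ hp2
      (hsupp _ (by rw [hop]; simp))
      (fun o2 h2 => hcompat _ (by rw [hop]; simp) o2 h2)
  · have hop : pvOps p = [(true, p.2, p.1), (false, p.1, p.2)] := by simp [pvOps, g1, g2]
    show (pvOps q).foldl (pvApp e) (pvIncBy d p c) = pvIncBy ((pvOps q).foldl (pvApp e) d) p c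
    rw [pvIncBy, pvIncBy, hop]
    simp only [List.foldl_cons, List.foldl_nil]
    have hoL : (true, p.2, p.1) ∈ pvOps p := by rw [hop]; simp
    have hoR : (false, p.1, p.2) ∈ pvOps p := by rw [hop]; simp
    rw [pv_swap_one_many e c (pvOps q) (pvApp c d (true, p.2, p.1)) (false, p.1, p.2)
        (pv_contains_app c d _ _ hp1)
        (pv_pres_app c d _ _ (hsupp _ hoR))
        (fun o2 h2 => hcompat _ hoR o2 h2)]
    rw [pv_swap_one_many e c (pvOps q) d (true, p.2, p.1) hp2 (hsupp _ hoL)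
        (fun o2 h2 => hcompat _ hoL o2 h2)]

theorem pv_app_merge (c : Int) (d : pvDD) (o : Bool × String × String) :
    pvApp 1 (pvApp c d o) o = pvApp (c + 1) d o := by
  obtain ⟨s, w, a⟩ := o
  have hinner : ∀ (D : PySem.Dict String Int),
      (D.modify a 0 (· + c)).modify a 0 (· + 1) = D.modify a 0 (· + (c + 1)) := by
    intro D
    rw [pv_modify_modify_self]
    exact congrArg _ (funext fun x => by ring)
  cases s <;>
  · simp only [pvApp, if_true, if_false, Bool.false_eq_true]
    rw [pv_modify_modify_self]
    apply pv_modify_congr_base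
    simp only [Prod.mk.injEq]
    first
    | exact ⟨trivial, hinner _⟩
    | exact ⟨hinner _, trivial⟩

theorem pv_merge (d : pvDD) (p : String × String) (c : Int)
    (hp1 : d.contains p.1 = true) :
    pvIncBy (pvIncBy d p c) p 1 = pvIncBy d p (c + 1) := by
  by_cases g1 : p.1 = "" <;> by_cases g2 : p.2 = "" <;>
    simp only [pvIncBy, pvOps, g1, g2, ne_eq, not_true_eq_false, not_false_iff, if_true,
      if_false, List.nil_append, List.append_nil, List.singleton_append, List.foldl_cons,
      List.foldl_nil]
  · exact pv_app_merge c d _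
  · exact pv_app_merge c d _
  · -- both ops: Lc, Rc, L1, R1  ⇝  L(c+1), R(c+1)
    have hswap : pvApp 1 (pvApp c (pvApp c d (true, p.2, p.1)) (false, p.1, p.2)) (true, p.2, p.1)
        = pvApp c (pvApp 1 (pvApp c d (true, p.2, p.1)) (true, p.2, p.1)) (false, p.1, p.2) := by
      exact pv_app_comm c 1 (pvApp c d (true, p.2, p.1)) (false, p.1, p.2) (true, p.2, p.1)
        (pv_contains_app c d _ _ hp1) (by intro h; simp at h)
    rw [hswap, pv_app_merge, pv_app_merge]

-- k further single occurrences of p merge into the batched count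
def pvIncN (d : pvDD) (p : String × String) : Nat → pvDD
  | 0 => d
  | k + 1 => pvIncN (pvIncBy d p 1) p k

theorem pv_merge_incN (p : String × String) (k : Nat) :
    ∀ (d : pvDD) (c : Int), d.contains p.1 = true →
    pvIncN (pvIncBy d p c) p k = pvIncBy d p (c + k) := by
  induction k with
  | zero => intro d c _; simp [pvIncN]
  | succ k ih =>
      intro d c h1
      show pvIncN (pvIncBy (pvIncBy d p c) p 1) p k = _
      rw [pv_merge d p c h1]
      rw [ih d (c + 1) h1]
      congr 1
      push_cast
      ring

theorem pv_commN (p q : String × String) (k : Nat) (hne : p ≠ q) :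
    ∀ (X : pvDD), X.contains p.1 = true → X.contains p.2 = true →
    X.contains q.1 = true → X.contains q.2 = true →
    (∀ o ∈ pvOps p, (pvInner X o).contains o.2.2 = true) →
    pvIncN (pvIncBy X q 1) p k = pvIncBy (pvIncN X p k) q 1 := by
  induction k with
  | zero => intro X _ _ _ _ _; rfl
  | succ k ih =>
      intro X hp1 hp2 hq1 hq2 hsupp
      show pvIncN (pvIncBy (pvIncBy X q 1) p 1) p k = _
      rw [(pv_swap_pairs X p q 1 1 hne hp1 hp2 hq1 hq2 hsupp).symm]
      rw [ih (pvIncBy X p 1) (pv_contains_incBy _ _ _ _ hp1) (pv_contains_incBy _ _ _ _ hp2)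
        (pv_contains_incBy _ _ _ _ hq1) (pv_contains_incBy _ _ _ _ hq2)
        (pv_supp_incBy X p 1)]
      rfl

-- pull all occurrences of p out of the remaining list
theorem pv_pull (p : String × String) (t : List (String × String)) :
    ∀ (X : pvDD), (∀ o ∈ pvOps p, (pvInner X o).contains o.2.2 = true) →
    X.contains p.1 = true → X.contains p.2 = true →
    (∀ q ∈ t, X.contains q.1 = true ∧ X.contains q.2 = true) →
    t.foldl (fun d q => pvIncBy d q 1) X
      = (t.filter (fun q => !(q == p))).foldl (fun d q => pvIncBy d q 1) (pvIncN X p (t.count p)) := by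
  induction t with
  | nil => intro X _ _ _ _; rfl
  | cons q t ih =>
      intro X hsupp hp1 hp2 ht
      by_cases hq : q = p
      · subst hq
        rw [List.foldl_cons]
        rw [ih (pvIncBy X q 1) (pv_supp_incBy X q 1)
          (pv_contains_incBy _ _ _ _ hp1) (pv_contains_incBy _ _ _ _ hp2)
          (fun r hr => ⟨pv_contains_incBy _ _ _ _ (ht r (by simp [hr])).1,
            pv_contains_incBy _ _ _ _ (ht r (by simp [hr])).2⟩)]
        have hcnt : (q :: t).count q = t.count q + 1 := by
          simp
        have hfil : (q :: t).filter (fun r => !(r == q)) = t.filter (fun r => !(r == q)) := by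
          simp
        rw [hcnt, hfil]
        rfl
      · rw [List.foldl_cons]
        have hq1 := (ht q (by simp)).1
        have hq2 := (ht q (by simp)).2
        rw [ih (pvIncBy X q 1)
          (fun o ho => pv_pres_incBy X q 1 o (hsupp o ho))
          (pv_contains_incBy _ _ _ _ hp1) (pv_contains_incBy _ _ _ _ hp2)
          (fun r hr => ⟨pv_contains_incBy _ _ _ _ (ht r (by simp [hr])).1,
            pv_contains_incBy _ _ _ _ (ht r (by simp [hr])).2⟩)]
        have hcnt : (q :: t).count p = t.count p := by
          simp [hq]
        have hfil : (q :: t).filter (fun r => !(r == p)) = q :: t.filter (fun r => !(r == p)) := by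
          simp [hq]
        rw [hcnt, hfil, List.foldl_cons]
        rw [pv_commN p q (t.count p) (Ne.symm hq) X hp1 hp2 hq1 hq2 hsupp]

-- first-occurrence dedup of a filter
theorem pv_ofList_filter (p : String × String) (xs : List (String × String)) :
    (PySem.Set.ofList xs).discard p = PySem.Set.ofList (xs.filter (fun q => !(q == p))) := by
  induction xs with
  | nil => rfl
  | cons x xs ih =>
      rw [PySem.Set.ofList_cons]
      unfold PySem.Set.discard at ih ⊢
      by_cases hx : x = p
      · subst hx
        rw [List.filter_cons_of_neg (by simp)]
        rw [List.filter_cons_of_neg (by simp)]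
        rw [List.filter_filter, ← ih]
        exact List.filter_congr (fun a _ => Bool.and_self _)
      · rw [List.filter_cons_of_pos (by simp [hx])]
        rw [List.filter_cons_of_pos (by simp [hx])]
        rw [PySem.Set.ofList_cons]
        unfold PySem.Set.discard
        rw [← ih]
        rw [List.filter_filter, List.filter_filter]
        exact congrArg (x :: ·) (List.filter_congr (fun a _ => Bool.and_comm _ _))

theorem pv_count_filter_ne (p k : String × String) (xs : List (String × String)) (h : k ≠ p) :
    (xs.filter (fun q => !(q == p))).count k = xs.count k :=
  List.count_filter (by simp [h])

-- THE grouping theorem: per-occurrence folding equals folding over distinct pairs with counts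
theorem pv_group (n : Nat) : ∀ (ps : List (String × String)) (d : pvDD), ps.length ≤ n →
    (∀ q ∈ ps, d.contains q.1 = true ∧ d.contains q.2 = true) →
    ps.foldl (fun d q => pvIncBy d q 1) d
      = (PySem.Set.ofList ps).foldl (fun d k => pvIncBy d k ((ps.count k : Int))) d := by
  induction n with
  | zero =>
      intro ps d hlen _
      have : ps = [] := List.eq_nil_of_length_eq_zero (Nat.le_zero.mp hlen)
      subst this; rfl
  | succ n ih =>
      intro ps d hlen hinv
      cases ps with
      | nil => rfl
      | cons p rest =>
          have hp1 := (hinv p (by simp)).1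
          have hp2 := (hinv p (by simp)).2
          rw [List.foldl_cons]
          rw [pv_pull p rest (pvIncBy d p 1) (pv_supp_incBy d p 1)
            (pv_contains_incBy _ _ _ _ hp1) (pv_contains_incBy _ _ _ _ hp2)
            (fun r hr => ⟨pv_contains_incBy _ _ _ _ (hinv r (by simp [hr])).1,
              pv_contains_incBy _ _ _ _ (hinv r (by simp [hr])).2⟩)]
          rw [pv_merge_incN p (rest.count p) d 1 hp1]
          set flt := rest.filter (fun q => !(q == p)) with hflt
          have hlen' : flt.length ≤ n := by
            have h1 : flt.length ≤ rest.length := by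
              rw [hflt]; exact List.length_filter_le _ _
            have h2 : rest.length + 1 ≤ n + 1 := by simpa using hlen
            omega
          have hinv' : ∀ q ∈ flt, (pvIncBy d p (1 + (rest.count p : Int))).contains q.1 = true
              ∧ (pvIncBy d p (1 + (rest.count p : Int))).contains q.2 = true := by
            intro q hq
            have hq' : q ∈ rest := List.mem_of_mem_filter hq
            exact ⟨pv_contains_incBy _ _ _ _ (hinv q (by simp [hq'])).1,
              pv_contains_incBy _ _ _ _ (hinv q (by simp [hq'])).2⟩
          rw [ih flt _ hlen' hinv']
          rw [PySem.Set.ofList_cons, List.foldl_cons, pv_ofList_filter p rest, ← hflt]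
          have hcount : ((p :: rest).count p : Int) = 1 + (rest.count p : Int) := by
            rw [List.count_cons_self]
            push_cast
            ring
          rw [hcount]
          apply PySem.List.foldl_congr_mem
          intro acc k hk
          have hkne : k ≠ p := by
            have := (PySem.Set.mem_ofList _ _).mp hk
            rw [hflt] at this
            have := List.of_mem_filter this
            simpa using this
          congr 1
          rw [hflt, pv_count_filter_ne p k rest hkne]
          have hpk : ¬(p = k) := fun h => hkne h.symm
          simp [hpk]

-- ===== assembly =====

theorem pv_alt_eq (L : List String) (oc : List (String × (List (String × Int)) × (List (String × Int)))) :
    armar_dict_frecuencias_alt L oc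
      = pvOfDD (((PySem.Dict.counter (L.zip L.tail)).items).foldl pvStepB (pvSdAll pvDfl L (pvToDD oc))) := by
  unfold armar_dict_frecuencias_alt
  show pvOfDD (((L.zip (PySem.List.slice L (some 1) none)).foldl
        (fun c par => c.modify par 0 (· + 1)) PySem.Dict.empty).items.foldl pvStepB
      (L.foldl (fun d pal => if d.contains pal then d else d.insert pal pvDfl) (pvToDD oc))) = _
  rw [PySem.List.slice_from_one, ← PySem.Dict.counter_eq_foldl]
  have hd0 : L.foldl (fun d pal => if d.contains pal then d else d.insert pal pvDfl) (pvToDD oc)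
      = pvSdAll pvDfl L (pvToDD oc) := by
    unfold pvSdAll
    exact PySem.List.foldl_congr_mem L _ _ _ (fun acc x _ => by rw [pv_guard_sd]; rfl)
  rw [hd0]

-- ===== VERDICT (by name: the statement is the Claim_ definition above) =====
theorem armar_dict_frecuencias_spec : Claim_equal_armar_dict_frecuencias := by
  unfold Claim_equal_armar_dict_frecuencias
  intro L oc _
  unfold Spec_armar_dict_frecuencias armar_dict_frecuencias
  have h1 := pv_bridge L L 0 rfl (pvToDD oc)
  simp only [Nat.cast_zero, if_true] at h1
  rw [h1, pv_main, pv_bfrom_empty, pv_alt_eq]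
  congr 1
  set d0 := pvSdAll pvDfl L (pvToDD oc) with hd0
  set pairs := L.zip L.tail with hpairs
  have hinv : ∀ q ∈ pairs, d0.contains q.1 = true ∧ d0.contains q.2 = true := by
    intro q hq
    have h := List.of_mem_zip (hpairs ▸ hq)
    exact ⟨pv_contains_sdAll_of_mem _ _ _ _ h.1,
      pv_contains_sdAll_of_mem _ _ _ _ (List.mem_of_mem_tail h.2)⟩
  have hA : pvBPairs L d0 = pairs.foldl (fun d q => pvIncBy d q 1) d0 := by
    unfold pvBPairs
    exact PySem.List.foldl_congr_mem _ _ _ _ (fun acc x _ => pv_incPair_eq acc x)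
  rw [hA, pv_group pairs.length pairs d0 le_rfl hinv]
  rw [PySem.Dict.items_counter]
  rw [List.foldl_map]
  apply PySem.List.foldl_congr_mem
  intro acc k _
  rw [pv_stepB_eq]
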